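-- pv_equiv track=rewrite | github.com/ezsx/junior_python_interview | Data_structures_and_algorithms/Leetcode/find_adjacent_empty_seats.py | find_adjacent_empty_seats
-- ===== SOURCE A (Python) =====
-- def find_adjacent_empty_seats(occupied_places):
--     seats = {}
--     for row, place in occupied_places:
--         if row not in seats:
--             seats[row] = set()
--         seats[row].add(place)
--
--     for row in sorted(seats.keys(), reverse=True):
--         occupied_row_seats = sorted(seats[row])
--         for i in range(1, len(occupied_row_seats)):
--             if occupied_row_seats[i] - occupied_row_seats[i-1] == 3:
--                 return row, occupied_row_seats[i-1] + 1
-- ===== SOURCE B (Python) =====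
-- def find_adjacent_empty_seats(occupied_places):
--     xs = sorted(set(occupied_places), key=lambda rp: (-rp[0], rp[1]))
--     for (r1, p1), (r2, p2) in zip(xs, xs[1:]):
--         if r1 == r2 and p2 - p1 == 3:
--             return r2, p1 + 1
--     return None
-- ===== Notes on version B (the rewrite author's own statement) =====
-- stated objective: simpler
-- what changed: Replaces A's row-grouping dict with per-row dedup sets, a descending sort of the keys and a nested per-row sort-plus-index loop by a single global sort of the deduplicated seat list with key (-row, place) followed by one linear scan of adjacent pairs guarded by same-row.
import Mathlib
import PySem

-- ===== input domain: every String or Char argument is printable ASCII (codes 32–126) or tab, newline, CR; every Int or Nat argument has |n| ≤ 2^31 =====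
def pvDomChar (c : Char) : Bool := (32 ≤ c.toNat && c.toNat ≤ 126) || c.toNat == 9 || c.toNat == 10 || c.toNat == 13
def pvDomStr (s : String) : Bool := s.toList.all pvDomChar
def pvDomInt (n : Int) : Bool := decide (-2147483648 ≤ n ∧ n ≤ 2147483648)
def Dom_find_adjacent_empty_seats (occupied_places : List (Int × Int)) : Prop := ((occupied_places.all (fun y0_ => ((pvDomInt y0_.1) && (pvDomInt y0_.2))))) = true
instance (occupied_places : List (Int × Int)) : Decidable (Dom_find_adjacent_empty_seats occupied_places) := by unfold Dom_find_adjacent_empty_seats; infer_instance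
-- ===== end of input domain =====

-- B replaces A's row-grouping dict plus nested per-row sorts by one global sort of the
-- deduplicated list with key (-row, place) and a single adjacent-pair scan (objective: simpler).

-- ===== PORT A =====
def find_adjacent_empty_seats (occupied_places : List (Int × Int)) : Option (Int × Int) :=
  -- seats = {}; for row, place in occupied_places: if row not in seats: seats[row] = set(); seats[row].add(place)
  let seats : PySem.Dict Int (PySem.Set Int) :=
    occupied_places.foldl (fun seats rp =>
      let seats := if seats.contains rp.1 then seats else seats.insert rp.1 PySem.Set.empty
      seats.modify rp.1 PySem.Set.empty (fun s => PySem.Set.add s rp.2)) PySem.Dict.empty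
  -- for row in sorted(seats.keys(), reverse=True): …  (early return threaded through the Option accumulator)
  (PySem.List.sorted seats.keys (fun x => x) true).foldl (fun acc row =>
    if acc.isSome then acc else
      let occupied_row_seats := PySem.List.sorted (seats.getD row PySem.Set.empty) (fun x => x)
      (PySem.List.pyRange 1 (occupied_row_seats.length : Int) 1).foldl (fun acc2 i =>
        if acc2.isSome then acc2
        else if PySem.List.pyGetD occupied_row_seats i 0 - PySem.List.pyGetD occupied_row_seats (i-1) 0 = 3 then
          some (row, PySem.List.pyGetD occupied_row_seats (i-1) 0 + 1)
        else acc2) acc) none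

-- ===== PORT B =====
-- the 'for (r1, p1), (r2, p2) in zip(xs, xs[1:])' loop with early return, as recursion on adjacent pairs
def pvAltScan : List (Int × Int) → Option (Int × Int)
  | (r1, p1) :: (r2, p2) :: rest =>
      if r1 = r2 ∧ p2 - p1 = 3 then some (r2, p1 + 1) else pvAltScan ((r2, p2) :: rest)
  | _ => none

def find_adjacent_empty_seats_alt (occupied_places : List (Int × Int)) : Option (Int × Int) :=
  pvAltScan (PySem.List.sorted2 (PySem.Set.ofList occupied_places) (fun rp => -rp.1) (fun rp => rp.2))

-- ===== PRECONDITION & SPEC =====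
def Spec_find_adjacent_empty_seats (occupied_places : List (Int × Int)) (out : Option (Int × Int)) : Prop := out = find_adjacent_empty_seats_alt occupied_places
instance (occupied_places : List (Int × Int)) (out : Option (Int × Int)) : Decidable (Spec_find_adjacent_empty_seats occupied_places out) := by unfold Spec_find_adjacent_empty_seats; infer_instance

-- ===== CLAIM (what is proved, stated in full; the proofs are below) =====
def Claim_equal_find_adjacent_empty_seats : Prop := ∀ (occupied_places : List (Int × Int)), Dom_find_adjacent_empty_seats occupied_places → Spec_find_adjacent_empty_seats occupied_places (find_adjacent_empty_seats occupied_places)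

-- ===== LEMMAS AND PROOFS =====

-- A's dict-building loop body, named for the proofs (identical to the lambda in the port)
def pvStep (seats : PySem.Dict Int (PySem.Set Int)) (rp : Int × Int) : PySem.Dict Int (PySem.Set Int) :=
  let seats := if seats.contains rp.1 then seats else seats.insert rp.1 PySem.Set.empty
  seats.modify rp.1 PySem.Set.empty (fun s => PySem.Set.add s rp.2)

-- the distinct places occurring in row r, sorted ascending
def pvPlaces (occ : List (Int × Int)) (r : Int) : List Int :=
  PySem.List.sorted (PySem.Set.ofList ((occ.filter (fun rp => rp.1 == r)).map (·.2))) (fun x => x)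

-- the distinct rows, sorted descending
def pvRows (occ : List (Int × Int)) : List Int :=
  PySem.List.sorted (PySem.Set.ofList (occ.map (·.1))) (fun x => x) true

def pvBlock (occ : List (Int × Int)) (r : Int) : List (Int × Int) :=
  (pvPlaces occ r).map (fun p => (r, p))

-- A's inner indexed loop, as a chain recursion on the sorted place list
def pvChainA (r : Int) : List Int → Option (Int × Int)
  | p :: q :: t => if q - p = 3 then some (r, p + 1) else pvChainA r (q :: t)
  | _ => none

-- ---- generic early-return fold ----
theorem pv_foldl_opt {ι β : Type} (step : Option β → ι → Option β) (g : ι → Option β)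
    (h1 : ∀ (v : β) (i : ι), step (some v) i = some v)
    (h2 : ∀ i : ι, step none i = g i) :
    ∀ (l : List ι) (a : Option β),
      l.foldl step a = (match a with | some v => some v | none => l.findSome? g) := by
  intro l
  induction l with
  | nil => intro a; cases a <;> simp [List.findSome?]
  | cons i t ih =>
    intro a
    cases a with
    | some v => simp [List.foldl_cons, h1, ih]
    | none =>
      simp only [List.foldl_cons, h2, List.findSome?]
      cases hg : g i with
      | some v => simp [ih]
      | none => simp [ih]

-- ---- dict lemmas ----
theorem pv_contains_iff_mem_keys (d : PySem.Dict Int (PySem.Set Int)) (k : Int) :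
    d.contains k = true ↔ k ∈ d.keys := by
  simp [PySem.Dict.contains, PySem.Dict.keys, List.any_eq_true, List.mem_map, beq_iff_eq]

theorem pv_get?_of_not_contains (d : PySem.Dict Int (PySem.Set Int)) (k : Int)
    (h : d.contains k = false) : d.get? k = none := by
  simp only [PySem.Dict.contains, List.any_eq_false] at h
  simp only [PySem.Dict.get?, Option.map_eq_none_iff]
  exact List.find?_eq_none.mpr h

theorem pv_keys_insert_mem (d : PySem.Dict Int (PySem.Set Int)) (k : Int) (v : PySem.Set Int)
    (h : d.contains k = true) : (d.insert k v).keys = d.keys := by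
  simp only [PySem.Dict.insert, h, if_pos, PySem.Dict.keys, List.map_map]
  apply List.map_congr_left
  intro p _
  by_cases hpk : p.1 = k <;> simp [hpk]

theorem pv_keys_insert_new (d : PySem.Dict Int (PySem.Set Int)) (k : Int) (v : PySem.Set Int)
    (h : d.contains k = false) : (d.insert k v).keys = d.keys ++ [k] := by
  simp [PySem.Dict.insert, h, PySem.Dict.keys]

theorem pv_contains_eq (d : PySem.Dict Int (PySem.Set Int)) (k : Int) :
    d.contains k = decide (k ∈ d.keys) := by
  rw [Bool.eq_iff_iff]; simp [pv_contains_iff_mem_keys]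

theorem pv_step_keys (d : PySem.Dict Int (PySem.Set Int)) (x : Int × Int) :
    (pvStep d x).keys = PySem.Set.add d.keys x.1 := by
  unfold pvStep PySem.Dict.modify PySem.Set.add
  rw [show (PySem.Set.contains d.keys x.1) = d.contains x.1 by
    simp [PySem.Set.contains, pv_contains_eq]]
  cases h : d.contains x.1 with
  | true =>
    simp only [if_pos]
    exact pv_keys_insert_mem d x.1 _ h
  | false =>
    simp only [Bool.false_eq_true, if_false]
    have h2 : (d.insert x.1 PySem.Set.empty).contains x.1 = true := by
      rw [pv_contains_iff_mem_keys, pv_keys_insert_new d _ _ h]; simp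
    rw [pv_keys_insert_mem _ _ _ h2, pv_keys_insert_new d _ _ h]

theorem pv_step_getD (d : PySem.Dict Int (PySem.Set Int)) (x : Int × Int) (r : Int) :
    (pvStep d x).getD r PySem.Set.empty
      = if r = x.1 then PySem.Set.add (d.getD x.1 PySem.Set.empty) x.2
        else d.getD r PySem.Set.empty := by
  unfold pvStep PySem.Dict.modify
  cases h : d.contains x.1 with
  | true =>
    simp only [if_pos]
    rw [PySem.Dict.getD_insert]
  | false =>
    simp only [Bool.false_eq_true, if_false]
    have hd : d.getD x.1 PySem.Set.empty = PySem.Set.empty := by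
      simp [PySem.Dict.getD, pv_get?_of_not_contains d x.1 h]
    rw [PySem.Dict.getD_insert, PySem.Dict.getD_insert, PySem.Dict.getD_insert, hd]
    by_cases hr : r = x.1 <;> simp [hr]

theorem pv_ofList_append {α : Type} [BEq α] (xs : List α) (y : α) :
    PySem.Set.ofList (xs ++ [y]) = PySem.Set.add (PySem.Set.ofList xs) y := by
  rw [PySem.Set.ofList_eq_foldl, PySem.Set.ofList_eq_foldl, List.foldl_append]
  rfl

theorem pv_dict_keys (occ : List (Int × Int)) :
    (occ.foldl pvStep PySem.Dict.empty).keys = PySem.Set.ofList (occ.map (·.1)) := by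
  induction occ using List.reverseRecOn with
  | nil => rfl
  | append_singleton t x ih =>
    rw [List.foldl_append, List.foldl_cons, List.foldl_nil, pv_step_keys, ih,
      List.map_append, List.map_cons, List.map_nil, pv_ofList_append]

theorem pv_dict_getD (occ : List (Int × Int)) (r : Int) :
    (occ.foldl pvStep PySem.Dict.empty).getD r PySem.Set.empty
      = PySem.Set.ofList ((occ.filter (fun rp => rp.1 == r)).map (·.2)) := by
  induction occ using List.reverseRecOn with
  | nil => rfl
  | append_singleton t x ih =>
    rw [List.foldl_append, List.foldl_cons, List.foldl_nil, pv_step_getD, List.filter_append]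
    by_cases hr : r = x.1
    · rw [if_pos hr, ← hr, ih]
      have hf : List.filter (fun rp => rp.1 == r) [x] = [x] := by simp [← hr]
      rw [hf, List.map_append, List.map_cons, List.map_nil, pv_ofList_append]
    · rw [if_neg hr]
      have hf : List.filter (fun rp => rp.1 == r) [x] = [] := by
        simp [beq_iff_eq, Ne.symm hr]
      rw [hf, List.append_nil, ih]

theorem pv_range_chain (r : Int) (l : List Int) :
    (List.range (l.length - 1)).findSome?
      (fun k => if l.getD (k+1) 0 - l.getD k 0 = 3 then some (r, l.getD k 0 + 1) else none)
      = pvChainA r l := by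
  induction l with
  | nil => rfl
  | cons x t ih =>
    cases t with
    | nil => rfl
    | cons y t' =>
      show (List.range (t'.length + 1)).findSome?
        (fun k => if (x :: y :: t').getD (k+1) 0 - (x :: y :: t').getD k 0 = 3 then
          some (r, (x :: y :: t').getD k 0 + 1) else none) = pvChainA r (x :: y :: t')
      rw [List.range_succ_eq_map, List.findSome?_cons, List.findSome?_map]
      have hcomp : ((fun k => if (x :: y :: t').getD (k+1) 0 - (x :: y :: t').getD k 0 = 3 then
            some (r, (x :: y :: t').getD k 0 + 1) else none) ∘ Nat.succ)
          = (fun k => if (y :: t').getD (k+1) 0 - (y :: t').getD k 0 = 3 then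
            some (r, (y :: t').getD k 0 + 1) else none) := rfl
      rw [hcomp]
      have iht : (List.range t'.length).findSome?
          (fun k => if (y :: t').getD (k+1) 0 - (y :: t').getD k 0 = 3 then
            some (r, (y :: t').getD k 0 + 1) else none) = pvChainA r (y :: t') := ih
      rw [iht]
      by_cases h3 : y - x = 3
      · simp [h3, pvChainA]
      · simp [h3, pvChainA]

theorem pv_inner_eq_chain (r : Int) (l : List Int) :
    (PySem.List.pyRange 1 (l.length : Int) 1).findSome?
      (fun i => if PySem.List.pyGetD l i 0 - PySem.List.pyGetD l (i-1) 0 = 3 then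
          some (r, PySem.List.pyGetD l (i-1) 0 + 1) else none)
      = pvChainA r l := by
  have hr : PySem.List.pyRange 1 (l.length : Int) 1
      = List.map (fun k : Nat => (1 : Int) + (k : Int)) (List.range (l.length - 1)) := by
    rw [PySem.List.pyRange_of_pos _ _ (by norm_num : (0:Int) < 1)]
    have h1 : ((l.length : Int) - 1 + 1 - 1) / 1 = (l.length : Int) - 1 := by simp
    rw [h1]
    have h2 : (if (1:Int) < (l.length : Int) then ((l.length : Int) - 1).toNat else 0)
        = l.length - 1 := by split <;> omega
    rw [h2]
    simp only [one_mul]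
  rw [hr, List.findSome?_map]
  have e1 : ∀ k : Nat, (1 : Int) + (k : Int) = ((k + 1 : Nat) : Int) := by intro k; push_cast; ring
  have e2 : ∀ k : Nat, ((k + 1 : Nat) : Int) - 1 = ((k : Nat) : Int) := by intro k; push_cast; ring
  simp only [Function.comp_def, e1, e2, PySem.List.pyGetD_natCast]
  exact pv_range_chain r l

theorem pv_chain_eq_altScan (r : Int) (l : List Int) :
    pvChainA r l = pvAltScan (l.map (fun p => (r, p))) := by
  induction l with
  | nil => rfl
  | cons x t ih =>
    cases t with
    | nil => rfl
    | cons y t' =>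
      by_cases h3 : y - x = 3 <;> simp [pvChainA, pvAltScan, h3, ih]

theorem pv_altScan_append (r : Int) :
    ∀ (B rest : List (Int × Int)), (∀ x ∈ B, x.1 = r) → (∀ y, rest.head? = some y → y.1 ≠ r) →
    pvAltScan (B ++ rest) = (pvAltScan B).or (pvAltScan rest) := by
  intro B
  induction B with
  | nil => intro rest _ _; simp [pvAltScan]
  | cons x B' ih =>
    intro rest hB hrest
    cases B' with
    | nil =>
      cases rest with
      | nil => simp [pvAltScan]
      | cons y t =>
        obtain ⟨x1, x2⟩ := x
        obtain ⟨y1, y2⟩ := y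
        have hx : x1 = r := hB (x1, x2) (by simp)
        have hy : y1 ≠ r := hrest (y1, y2) (by simp)
        have hne : ¬(x1 = y1 ∧ y2 - x2 = 3) := by
          rintro ⟨h1, -⟩
          exact hy (h1 ▸ hx)
        simp [pvAltScan, hne]
    | cons z B'' =>
      obtain ⟨x1, x2⟩ := x
      obtain ⟨z1, z2⟩ := z
      have hrec := ih rest (fun w hw => hB w (List.mem_cons_of_mem _ hw)) hrest
      by_cases hc : x1 = z1 ∧ z2 - x2 = 3
      · simp [pvAltScan, hc]
      · have h1 : pvAltScan ((x1,x2) :: (z1,z2) :: (B'' ++ rest)) = pvAltScan ((z1,z2) :: (B'' ++ rest)) := by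
          simp [pvAltScan, hc]
        have h2 : pvAltScan ((x1,x2) :: (z1,z2) :: B'') = pvAltScan ((z1,z2) :: B'') := by
          simp [pvAltScan, hc]
        show pvAltScan ((x1,x2) :: (z1,z2) :: (B'' ++ rest)) = (pvAltScan ((x1,x2) :: (z1,z2) :: B'')).or (pvAltScan rest)
        rw [h1, h2]
        exact hrec

theorem pv_altScan_flatMap (occ : List (Int × Int)) :
    ∀ (R : List Int), R.Nodup →
      pvAltScan (R.flatMap (pvBlock occ)) = R.findSome? (fun r => pvAltScan (pvBlock occ r)) := by
  intro R
  induction R with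
  | nil => intro _; simp [pvAltScan]
  | cons r R' ih =>
    intro hnd
    rw [List.flatMap_cons]
    rw [pv_altScan_append r (pvBlock occ r) _ ?_ ?_]
    · rw [ih (List.Nodup.of_cons hnd), List.findSome?_cons]
      cases h : pvAltScan (pvBlock occ r) <;> simp
    · intro x hx
      simp only [pvBlock, List.mem_map] at hx
      obtain ⟨p, -, rfl⟩ := hx
      rfl
    · intro y hy hyr
      have hmem : y ∈ R'.flatMap (pvBlock occ) := by
        rcases List.head?_eq_some_iff.mp hy with ⟨ys, h⟩
        rw [h]; exact List.mem_cons_self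
      rcases List.mem_flatMap.mp hmem with ⟨r', hr', hyb⟩
      simp only [pvBlock, List.mem_map] at hyb
      obtain ⟨p, -, rfl⟩ := hyb
      exact (List.nodup_cons.mp hnd).1 (hyr ▸ hr')

theorem pv_sorted2_eq_sorted_lex (xs : List (Int × Int)) :
    PySem.List.sorted2 xs (fun rp => -rp.1) (fun rp => rp.2)
      = PySem.List.sorted xs (fun rp => (toLex (-rp.1, rp.2) : Lex (Int × Int))) := by
  rw [PySem.List.sorted_eq_foldl_insertBy]
  show List.foldl (fun acc x => PySem.List.insertBy
      (fun a b => decide (-a.1 < -b.1) || (!decide (-b.1 < -a.1) && decide (a.2 < b.2))) x acc) [] xs = _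
  have hfun : (fun (a b : Int × Int) => decide (-a.1 < -b.1) || (!decide (-b.1 < -a.1) && decide (a.2 < b.2)))
      = (fun (a b : Int × Int) => decide ((toLex (-a.1, a.2) : Lex (Int × Int)) < toLex (-b.1, b.2))) := by
    funext a b
    rw [Bool.eq_iff_iff]
    simp only [Bool.or_eq_true, Bool.and_eq_true, Bool.not_eq_true', decide_eq_true_eq,
      decide_eq_false_iff_not, Prod.Lex.toLex_lt_toLex]
    omega
  rw [hfun]

theorem pv_rows_nodup (occ : List (Int × Int)) : (pvRows occ).Nodup :=
  ((PySem.List.sorted_perm _ _ _).nodup_iff).mpr (PySem.Set.nodup_ofList _)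

theorem pv_rows_sorted_gt (occ : List (Int × Int)) :
    (pvRows occ).Pairwise (fun a b => b < a) := by
  have h1 := PySem.List.sorted_pairwise_rev (PySem.Set.ofList (occ.map (·.1))) (fun x => x)
  exact (h1.and (pv_rows_nodup occ)).imp (fun h => lt_of_le_of_ne h.1 (Ne.symm h.2))

theorem pv_places_lt (occ : List (Int × Int)) (r : Int) :
    (pvPlaces occ r).Pairwise (· < ·) :=
  PySem.List.sorted_ofList_pairwise_lt _

theorem pv_blocks_pairwise (occ : List (Int × Int)) :
    ∀ R : List Int, R.Pairwise (fun a b => b < a) →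
      (R.flatMap (pvBlock occ)).Pairwise
        (fun a b : Int × Int => (toLex (-a.1, a.2) : Lex (Int × Int)) < toLex (-b.1, b.2)) := by
  intro R
  induction R with
  | nil => intro _; simp
  | cons r R' ih =>
    intro hp
    rw [List.flatMap_cons, List.pairwise_append]
    refine ⟨?_, ih (List.Pairwise.of_cons hp), ?_⟩
    · refine List.Pairwise.map _ (fun p q hpq => ?_) (pv_places_lt occ r)
      rw [Prod.Lex.toLex_lt_toLex]
      right; exact ⟨rfl, hpq⟩
    · intro a ha b hb
      simp only [pvBlock, List.mem_map] at ha
      obtain ⟨p, -, rfl⟩ := ha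
      rcases List.mem_flatMap.mp hb with ⟨r', hr', hb'⟩
      simp only [pvBlock, List.mem_map] at hb'
      obtain ⟨q, -, rfl⟩ := hb'
      have : r' < r := (List.pairwise_cons.mp hp).1 r' hr'
      rw [Prod.Lex.toLex_lt_toLex]
      left; simpa using this

theorem pv_mem_blocks (occ : List (Int × Int)) (x : Int × Int) :
    x ∈ (pvRows occ).flatMap (pvBlock occ) ↔ x ∈ occ := by
  obtain ⟨r0, p0⟩ := x
  simp only [List.mem_flatMap, pvBlock, pvRows, pvPlaces, PySem.List.mem_sorted,
    PySem.Set.mem_ofList, List.mem_map, List.mem_filter, Prod.mk.injEq, beq_iff_eq]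
  constructor
  · rintro ⟨r, -, p, ⟨rp, ⟨hrp, hfst⟩, hsnd⟩, rfl, rfl⟩
    have : rp = (r, p) := by
      obtain ⟨a, b⟩ := rp
      simp_all
    rwa [this] at hrp
  · intro h
    exact ⟨r0, ⟨(r0, p0), h, rfl⟩, p0, ⟨(r0, p0), ⟨h, rfl⟩, rfl⟩, rfl, rfl⟩

theorem pv_blocks_nodup (occ : List (Int × Int)) :
    ((pvRows occ).flatMap (pvBlock occ)).Nodup := by
  refine (pv_blocks_pairwise occ _ (pv_rows_sorted_gt occ)).imp (fun h heq => ?_)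
  subst heq
  exact lt_irrefl _ h

theorem pv_sorted2_eq_blocks (occ : List (Int × Int)) :
    PySem.List.sorted2 (PySem.Set.ofList occ) (fun rp => -rp.1) (fun rp => rp.2)
      = (pvRows occ).flatMap (pvBlock occ) := by
  rw [pv_sorted2_eq_sorted_lex]
  apply PySem.List.sorted_eq_of_perm_of_pairwise_lt
  · refine (List.perm_ext_iff_of_nodup (pv_blocks_nodup occ) (PySem.Set.nodup_ofList occ)).mpr ?_
    intro a
    rw [pv_mem_blocks, PySem.Set.mem_ofList]
  · exact pv_blocks_pairwise occ _ (pv_rows_sorted_gt occ)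

-- outer/inner early-return loops of A, as a findSome? over rows of the chain scan
theorem pv_outer (rows : List Int) (f : Int → List Int) :
    rows.foldl (fun acc row =>
      if acc.isSome then acc else
        (PySem.List.pyRange 1 ((f row).length : Int) 1).foldl (fun acc2 i =>
          if acc2.isSome then acc2
          else if PySem.List.pyGetD (f row) i 0 - PySem.List.pyGetD (f row) (i-1) 0 = 3 then
            some (row, PySem.List.pyGetD (f row) (i-1) 0 + 1)
          else acc2) acc) none
    = rows.findSome? (fun row => pvChainA row (f row)) := by
  rw [pv_foldl_opt _ (fun row => pvChainA row (f row)) (by intro v i; simp)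
    (by
      intro row
      simp only [Option.isSome_none, Bool.false_eq_true, if_false]
      rw [pv_foldl_opt _ (fun i => if PySem.List.pyGetD (f row) i 0 - PySem.List.pyGetD (f row) (i-1) 0 = 3 then
            some (row, PySem.List.pyGetD (f row) (i-1) 0 + 1) else none)
          (by intro v i; simp) (by intro i; simp)]
      exact pv_inner_eq_chain row (f row))]

theorem pv_portA_eval (occ : List (Int × Int)) :
    find_adjacent_empty_seats occ = (pvRows occ).findSome? (fun r => pvChainA r (pvPlaces occ r)) := by
  have hA0 : find_adjacent_empty_seats occ =
      (PySem.List.sorted (occ.foldl pvStep PySem.Dict.empty).keys (fun x => x) true).foldl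
        (fun acc row =>
          if acc.isSome then acc else
            (PySem.List.pyRange 1 ((PySem.List.sorted ((occ.foldl pvStep PySem.Dict.empty).getD row PySem.Set.empty) (fun x => x)).length : Int) 1).foldl
              (fun acc2 i =>
                if acc2.isSome then acc2
                else if PySem.List.pyGetD (PySem.List.sorted ((occ.foldl pvStep PySem.Dict.empty).getD row PySem.Set.empty) (fun x => x)) i 0
                        - PySem.List.pyGetD (PySem.List.sorted ((occ.foldl pvStep PySem.Dict.empty).getD row PySem.Set.empty) (fun x => x)) (i-1) 0 = 3 then
                  some (row, PySem.List.pyGetD (PySem.List.sorted ((occ.foldl pvStep PySem.Dict.empty).getD row PySem.Set.empty) (fun x => x)) (i-1) 0 + 1)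
                else acc2) acc) none := rfl
  rw [hA0]
  simp only [pv_dict_keys, pv_dict_getD]
  exact pv_outer _ _

theorem pv_portB_eval (occ : List (Int × Int)) :
    find_adjacent_empty_seats_alt occ = (pvRows occ).findSome? (fun r => pvChainA r (pvPlaces occ r)) := by
  show pvAltScan (PySem.List.sorted2 (PySem.Set.ofList occ) (fun rp => -rp.1) (fun rp => rp.2)) = _
  rw [pv_sorted2_eq_blocks, pv_altScan_flatMap occ _ (pv_rows_nodup occ)]
  have h : ∀ r : Int, pvAltScan (pvBlock occ r) = pvChainA r (pvPlaces occ r) :=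
    fun r => (pv_chain_eq_altScan r (pvPlaces occ r)).symm
  simp only [h]

-- ===== VERDICT (by name: the statement is the Claim_ definition above) =====
theorem find_adjacent_empty_seats_spec : Claim_equal_find_adjacent_empty_seats := by
  intro occ _
  unfold Spec_find_adjacent_empty_seats
  rw [pv_portA_eval, pv_portB_eval]
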